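-- pv_equiv track=rewrite | github.com/tgparkk/AutoTrade | websocket/liquidity_tracker.py | _compute
-- ===== SOURCE A (Python) =====
-- def _compute(dq):
--     quote_cnt = 0
--     trade_cnt = 0
--     trade_vol = 0
--     for (_, is_quote, vol) in dq:
--         if is_quote:
--             quote_cnt += 1
--         else:
--             trade_cnt += 1
--             trade_vol += vol
--     return quote_cnt, trade_cnt, trade_vol
-- ===== SOURCE B (Python) =====
-- def _compute(dq):
--     items = list(dq)
--
--     def agg(lo, hi):
--         if hi - lo == 0:
--             return (0, 0, 0)
--         if hi - lo == 1:
--             _, is_quote, vol = items[lo]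
--             return (1, 0, 0) if is_quote else (0, 1, vol)
--         mid = (lo + hi) // 2
--         q1, t1, v1 = agg(lo, mid)
--         q2, t2, v2 = agg(mid, hi)
--         return (q1 + q2, t1 + t2, v1 + v2)
--
--     return agg(0, len(items))
-- ===== Notes on version B (the rewrite author's own statement) =====
-- stated objective: alternative
-- what changed: Replaces A's single linear accumulating loop with a divide-and-conquer recursion: split the sequence in half, aggregate each half recursively, and merge the two (quote_cnt, trade_cnt, trade_vol) triples componentwise.
import Mathlib
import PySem

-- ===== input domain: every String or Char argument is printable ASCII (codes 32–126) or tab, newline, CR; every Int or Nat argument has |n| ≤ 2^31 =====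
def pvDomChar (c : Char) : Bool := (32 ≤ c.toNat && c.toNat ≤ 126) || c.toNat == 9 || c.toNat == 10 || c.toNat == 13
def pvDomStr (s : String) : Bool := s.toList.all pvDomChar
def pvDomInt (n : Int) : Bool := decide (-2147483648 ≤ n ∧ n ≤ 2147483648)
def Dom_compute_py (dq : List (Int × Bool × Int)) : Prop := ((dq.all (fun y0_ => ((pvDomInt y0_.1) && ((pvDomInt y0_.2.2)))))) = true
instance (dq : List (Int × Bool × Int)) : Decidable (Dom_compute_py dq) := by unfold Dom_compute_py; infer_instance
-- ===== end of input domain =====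

-- B replaces A's single linear accumulating loop by a divide-and-conquer recursion
-- (split in half, aggregate each half, merge triples componentwise); objective: alternative.

-- ===== PORT A =====
-- single loop carrying (quote_cnt, trade_cnt, trade_vol)
def compute_py (dq : List (Int × Bool × Int)) : Int × Int × Int :=
  dq.foldl
    (fun (acc : Int × Int × Int) q =>
      let (quote_cnt, trade_cnt, trade_vol) := acc
      if q.2.1 then (quote_cnt + 1, trade_cnt, trade_vol)
      else (quote_cnt, trade_cnt + 1, trade_vol + q.2.2))
    (0, 0, 0)

-- ===== PORT B =====
-- divide-and-conquer helper agg: base cases for length 0 and 1, otherwise split at mid and merge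
def computeAgg : List (Int × Bool × Int) → Int × Int × Int
  | [] => (0, 0, 0)
  | [x] => if x.2.1 then (1, 0, 0) else (0, 1, x.2.2)
  | x :: y :: rest =>
    let mid := (x :: y :: rest).length / 2
    let L := computeAgg ((x :: y :: rest).take mid)
    let R := computeAgg ((x :: y :: rest).drop mid)
    (L.1 + R.1, L.2.1 + R.2.1, L.2.2 + R.2.2)
termination_by l => l.length
decreasing_by
  · simp [List.length_take]; omega
  · simp; omega

def compute_py_alt (dq : List (Int × Bool × Int)) : Int × Int × Int :=
  computeAgg dq

-- ===== PRECONDITION & SPEC =====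
def Spec_compute_py (dq : List (Int × Bool × Int)) (out : Int × Int × Int) : Prop := out = compute_py_alt dq
instance (dq : List (Int × Bool × Int)) (out : Int × Int × Int) : Decidable (Spec_compute_py dq out) := by unfold Spec_compute_py; infer_instance

-- ===== CLAIM (what is proved, stated in full; the proofs are below) =====
def Claim_equal_compute_py : Prop := ∀ (dq : List (Int × Bool × Int)), Dom_compute_py dq → Spec_compute_py dq (compute_py dq)

-- ===== LEMMAS AND PROOFS =====

-- the common characterisation: both programs compute these three aggregates
def aggSpec (l : List (Int × Bool × Int)) : Int × Int × Int :=
  ((l.countP (fun q => q.2.1) : Int), (l.countP (fun q => !q.2.1) : Int),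
   ((l.filter (fun q => !q.2.1)).map (fun q => q.2.2)).sum)

-- aggSpec is additive over append
theorem aggSpec_append (l r : List (Int × Bool × Int)) :
    aggSpec (l ++ r) = ((aggSpec l).1 + (aggSpec r).1, (aggSpec l).2.1 + (aggSpec r).2.1,
                        (aggSpec l).2.2 + (aggSpec r).2.2) := by
  simp [aggSpec, List.countP_append]

-- B's divide-and-conquer recursion computes aggSpec
theorem computeAgg_eq (l : List (Int × Bool × Int)) : computeAgg l = aggSpec l := by
  induction l using computeAgg.induct with
  | case1 => simp [computeAgg, aggSpec]
  | case2 x h => simp [computeAgg, aggSpec, h]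
  | case3 x h => simp [computeAgg, aggSpec, h]
  | case4 x y rest mid ih1 ih2 =>
    rw [computeAgg]
    have := aggSpec_append ((x :: y :: rest).take ((x :: y :: rest).length / 2))
      ((x :: y :: rest).drop ((x :: y :: rest).length / 2))
    rw [List.take_append_drop] at this
    simp only [mid, List.length_cons] at ih1 ih2
    simp [this, ih1, ih2]

-- A's loop starting from any accumulator equals that accumulator shifted by aggSpec
theorem compute_py_fold_inv (dq : List (Int × Bool × Int)) (a b c : Int) :
    dq.foldl
      (fun (acc : Int × Int × Int) q =>
        let (quote_cnt, trade_cnt, trade_vol) := acc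
        if q.2.1 then (quote_cnt + 1, trade_cnt, trade_vol)
        else (quote_cnt, trade_cnt + 1, trade_vol + q.2.2))
      (a, b, c)
    = (a + (aggSpec dq).1, b + (aggSpec dq).2.1, c + (aggSpec dq).2.2) := by
  induction dq generalizing a b c with
  | nil => simp [aggSpec]
  | cons hd tl ih =>
    by_cases h : hd.2.1
    · simp [h, ih, aggSpec]; ring
    · simp [h, ih, aggSpec]
      refine ⟨by ring, by ring⟩

-- ===== VERDICT (by name: the statement is the Claim_ definition above) =====
theorem compute_py_spec : Claim_equal_compute_py := by
  intro dq _
  unfold Spec_compute_py compute_py compute_py_alt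
  rw [compute_py_fold_inv, computeAgg_eq]
  simp
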